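-- pv_equiv track=rewrite | github.com/kzalewski11/advent_of_code | day5/part1.py | bsp
-- ===== SOURCE A (Python) =====
-- def bsp(string, lowerbound, upperbound):
-- 	#base case is string length 1
-- 	if len(string) == 1:
-- 		if (string == 'F' or string == 'L') :
-- 			return lowerbound
-- 		else:
-- 			return upperbound
--
-- 	#strip off first character and determine bounds
-- 	param = string[0]
-- 	midpoint = int((upperbound - lowerbound) / 2) + lowerbound
--
-- 	#F means lower half, B means upper half
-- 	if (param == 'F' or param == 'L'):
-- 		newlower = lowerbound
-- 		newupper = midpoint
-- 	else:
-- 		newlower = midpoint + 1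
-- 		newupper = upperbound
--
-- 	#R E C U R S I O N
-- 	return bsp(string[1:], newlower, newupper)
-- ===== SOURCE B (Python) =====
-- def bsp(string, lowerbound, upperbound):
--     # Iterative single pass: narrow [lo, hi] one character at a time, no slicing.
--     lo, hi = lowerbound, upperbound
--     for ch in string[:-1]:
--         mid = lo + int((hi - lo) / 2)
--         if ch in 'FL':
--             hi = mid
--         else:
--             lo = mid + 1
--     return lo if string[-1] in 'FL' else hi
-- ===== Notes on version B (the rewrite author's own statement) =====
-- stated objective: faster
-- what changed: Replaced A's recursion that slices string[1:] at every level with a single iterative pass over the characters maintaining (lo, hi); Pre_ excludes only the empty string, on which both raise IndexError.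
import Mathlib
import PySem

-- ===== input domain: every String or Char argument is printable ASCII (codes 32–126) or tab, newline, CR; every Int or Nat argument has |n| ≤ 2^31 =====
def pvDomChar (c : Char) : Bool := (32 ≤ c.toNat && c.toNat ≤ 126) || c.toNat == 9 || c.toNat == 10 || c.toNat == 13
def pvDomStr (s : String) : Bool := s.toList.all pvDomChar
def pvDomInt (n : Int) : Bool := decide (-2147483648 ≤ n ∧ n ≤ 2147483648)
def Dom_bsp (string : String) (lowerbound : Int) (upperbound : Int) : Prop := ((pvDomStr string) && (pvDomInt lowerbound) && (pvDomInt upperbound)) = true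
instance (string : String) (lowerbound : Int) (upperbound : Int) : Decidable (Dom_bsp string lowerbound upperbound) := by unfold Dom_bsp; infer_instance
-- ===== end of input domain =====

-- B replaces A's O(n^2) slicing recursion by a single iterative pass over the characters.

-- ===== PORT A =====
-- int((u - l) / 2) in Python truncates toward zero; exact here since |u - l| ≤ 2^32
-- fits a float exactly. Ported as Int.tdiv (truncated division).
def bspAuxA : List Char → Int → Int → Int
  | [], _, _ => 0  -- unreachable: A raises IndexError on "", excluded by Pre_bsp
  | [c], lowerbound, upperbound =>
      if c = 'F' ∨ c = 'L' then lowerbound else upperbound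
  | c :: rest@(_ :: _), lowerbound, upperbound =>
      let midpoint := Int.tdiv (upperbound - lowerbound) 2 + lowerbound
      if c = 'F' ∨ c = 'L' then
        bspAuxA rest lowerbound midpoint
      else
        bspAuxA rest (midpoint + 1) upperbound

def bsp (string : String) (lowerbound : Int) (upperbound : Int) : Int :=
  bspAuxA string.toList lowerbound upperbound

-- ===== PORT B =====
-- One step of B's loop body; int((hi - lo) / 2) truncates toward zero → Int.tdiv
-- (exact on Dom: |hi - lo| ≤ 2^32 is exactly representable as a float).
def bspStepB (st : Int × Int) (ch : Char) : Int × Int :=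
  let mid := st.1 + Int.tdiv (st.2 - st.1) 2
  if ch = 'F' ∨ ch = 'L' then (st.1, mid) else (mid + 1, st.2)

def bsp_alt (string : String) (lowerbound : Int) (upperbound : Int) : Int :=
  let cs := string.toList
  let st := cs.dropLast.foldl bspStepB (lowerbound, upperbound)
  match cs.getLast? with
  | none => 0  -- unreachable: B raises IndexError on "", excluded by Pre_bsp
  | some c => if c = 'F' ∨ c = 'L' then st.1 else st.2

-- ===== PRECONDITION & SPEC =====
-- Pre_ excludes only the empty string, on which A (string[0]) and B (string[-1]) both raise IndexError.
def Pre_bsp (string : String) (lowerbound : Int) (upperbound : Int) : Prop :=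
  string.toList ≠ []
instance (string : String) (lowerbound : Int) (upperbound : Int) : Decidable (Pre_bsp string lowerbound upperbound) := by unfold Pre_bsp; infer_instance

def pvWitness_bsp : String × Int × Int := ("FBFBBFF", 0, 127)

def Spec_bsp (string : String) (lowerbound : Int) (upperbound : Int) (out : Int) : Prop := out = bsp_alt string lowerbound upperbound
instance (string : String) (lowerbound : Int) (upperbound : Int) (out : Int) : Decidable (Spec_bsp string lowerbound upperbound out) := by unfold Spec_bsp; infer_instance

-- ===== CLAIM =====
def Claim_equal_bsp : Prop := ∀ (string : String) (lowerbound : Int) (upperbound : Int), Dom_bsp string lowerbound upperbound → Pre_bsp string lowerbound upperbound → Spec_bsp string lowerbound upperbound (bsp string lowerbound upperbound)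

-- ===== LEMMAS AND PROOFS =====

theorem bspAuxA_eq_fold (cs : List Char) :
    ∀ (lo hi : Int), cs ≠ [] →
      bspAuxA cs lo hi =
        (let st := cs.dropLast.foldl bspStepB (lo, hi)
         match cs.getLast? with
         | none => 0
         | some c => if c = 'F' ∨ c = 'L' then st.1 else st.2) := by
  induction cs with
  | nil => intro _ _ h; exact absurd rfl h
  | cons c rest ih =>
    intro lo hi _
    cases rest with
    | nil => simp [bspAuxA]
    | cons c' rest' =>
      have hne : (c' :: rest') ≠ [] := by simp
      simp only [bspAuxA, List.dropLast_cons_of_ne_nil hne, List.getLast?_cons_cons,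
        List.foldl_cons]
      rw [ih _ _ hne, ih _ _ hne]
      simp only [bspStepB]
      split <;> simp [Int.add_comm]

-- ===== VERDICT =====
theorem bsp_spec : Claim_equal_bsp := by
  intro s lo hi _ hpre
  show bsp s lo hi = bsp_alt s lo hi
  unfold bsp bsp_alt
  exact bspAuxA_eq_fold s.toList lo hi hpre
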